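-- pv_equiv track=rewrite | github.com/Janek21/Bioinfo_share_2Y_2T | Jaume/ASAB/score_seq.py | score_seqs
-- ===== SOURCE A (Python) =====
-- def score_seqs(seq_1, seq_2, good, wrong):
-- 	'''
-- 	>>> score_seqs("THEFASTCAT", "THEFASTCAT", 1, -1)
-- 	10
-- 	>>> score_seqs("THEFASTCAT", "THELASTCAT", 1, -1)
-- 	8
-- 	>>> score_seqs("THEFASTCAT", "THELASTRAT", 1, -1)
-- 	6
-- 	>>> score_seqs("THEFASTCAT", "THE", 1, -1)
-- 	0
-- 	'''
--
-- 	score = 0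
--
-- 	if len(seq_1) != len(seq_2):
-- 		return 0
--
-- 	else:
--
-- 		for i in range(len(seq_1)):
--
-- 			if seq_1[i] == seq_2[i]:
-- 				score += good
--
-- 			else:
-- 				score += wrong
--
-- 	return score
-- ===== SOURCE B (Python) =====
-- def score_seqs(seq_1, seq_2, good, wrong):
--     if len(seq_1) != len(seq_2):
--         return 0
--
--     def go(a, b):
--         # divide and conquer over the two equal-length strings
--         if not a:
--             return 0
--         if len(a) == 1:
--             return good if a == b else wrong
--         m = len(a) // 2
--         return go(a[:m], b[:m]) + go(a[m:], b[m:])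
--
--     return go(seq_1, seq_2)
-- ===== Notes on version B (the rewrite author's own statement) =====
-- stated objective: alternative
-- what changed: B replaces A's linear index loop with a good/wrong accumulator by a divide-and-conquer recursion that splits the paired strings in half and sums the scores of the two halves, scoring singletons directly.
import Mathlib
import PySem

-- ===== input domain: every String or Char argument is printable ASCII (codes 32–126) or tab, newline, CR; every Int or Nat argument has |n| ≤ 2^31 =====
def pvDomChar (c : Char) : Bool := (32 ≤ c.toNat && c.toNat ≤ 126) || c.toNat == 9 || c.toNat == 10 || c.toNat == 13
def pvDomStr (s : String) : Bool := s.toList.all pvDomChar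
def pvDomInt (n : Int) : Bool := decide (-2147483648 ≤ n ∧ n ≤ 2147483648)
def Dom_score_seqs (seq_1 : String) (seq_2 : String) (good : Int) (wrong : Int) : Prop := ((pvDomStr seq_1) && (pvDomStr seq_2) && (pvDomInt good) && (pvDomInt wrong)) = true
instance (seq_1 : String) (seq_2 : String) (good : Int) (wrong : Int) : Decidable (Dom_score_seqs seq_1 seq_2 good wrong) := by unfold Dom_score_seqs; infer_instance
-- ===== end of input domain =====

-- B replaces A's linear index loop with a divide-and-conquer recursion over the paired strings (alternative decomposition, same cost).
-- ===== PORT A =====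
def score_seqs (seq_1 : String) (seq_2 : String) (good : Int) (wrong : Int) : Int :=
  let l1 := seq_1.toList
  let l2 := seq_2.toList
  if l1.length ≠ l2.length then 0
  else
    (PySem.List.pyRange 0 (l1.length : Int) 1).foldl
      (fun score i =>
        if PySem.List.pyGetD l1 i ' ' == PySem.List.pyGetD l2 i ' ' then score + good
        else score + wrong) 0

-- ===== PORT B =====
-- go(a, b): divide-and-conquer; slices a[:m]/a[m:] with 0 ≤ m ≤ len a are List.take/List.drop
def pvGo (good wrong : Int) (a b : List Char) : Int :=
  if a = [] then 0
  else if a.length = 1 then (if a == b then good else wrong)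
  else
    pvGo good wrong (a.take (a.length / 2)) (b.take (a.length / 2)) +
    pvGo good wrong (a.drop (a.length / 2)) (b.drop (a.length / 2))
termination_by a.length
decreasing_by
  · have ha : a ≠ [] := by assumption
    have h0 : a.length ≠ 0 := by simpa using ha
    simp only [List.length_take]
    omega
  · have ha : a ≠ [] := by assumption
    have h1 : ¬ a.length = 1 := by assumption
    have h0 : a.length ≠ 0 := by simpa using ha
    simp only [List.length_drop]
    omega

def score_seqs_alt (seq_1 : String) (seq_2 : String) (good : Int) (wrong : Int) : Int :=
  let l1 := seq_1.toList
  let l2 := seq_2.toList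
  if l1.length ≠ l2.length then 0
  else pvGo good wrong l1 l2

-- ===== PRECONDITION & SPEC =====
def Spec_score_seqs (seq_1 : String) (seq_2 : String) (good : Int) (wrong : Int) (out : Int) : Prop := out = score_seqs_alt seq_1 seq_2 good wrong
instance (seq_1 : String) (seq_2 : String) (good : Int) (wrong : Int) (out : Int) : Decidable (Spec_score_seqs seq_1 seq_2 good wrong out) := by unfold Spec_score_seqs; infer_instance

-- ===== CLAIM (what is proved, stated in full; the proofs are below) =====
def Claim_equal_score_seqs : Prop := ∀ (seq_1 : String) (seq_2 : String) (good : Int) (wrong : Int), Dom_score_seqs seq_1 seq_2 good wrong → Spec_score_seqs seq_1 seq_2 good wrong (score_seqs seq_1 seq_2 good wrong)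

-- ===== LEMMAS AND PROOFS =====

-- the common semantic core: the per-pair score sum over the zipped strings
def pvW (good wrong : Int) (p : Char × Char) : Int := if p.1 == p.2 then good else wrong

-- A's fold is init plus the pair-score sum
theorem pv_fold_eq_sum (good wrong : Int) (ps : List (Char × Char)) (init : Int) :
    ps.foldl (fun s p => if p.1 == p.2 then s + good else s + wrong) init
      = init + (ps.map (pvW good wrong)).sum := by
  induction ps generalizing init with
  | nil => simp
  | cons h t ih =>
    simp only [List.foldl_cons, List.map_cons, List.sum_cons, ih, pvW]
    by_cases hc : (h.1 == h.2) = true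
    · simp [hc]; ring
    · simp [hc]; ring

-- zip commutes with take and drop (helpers for splitting the pair list)
theorem pv_zip_take : ∀ (n : Nat) (l1 l2 : List Char), (l1.take n).zip (l2.take n) = (l1.zip l2).take n := by
  intro n
  induction n with
  | zero => intro l1 l2; simp
  | succ k ih =>
    intro l1 l2
    cases l1 with
    | nil => simp
    | cons c t1 =>
      cases l2 with
      | nil => simp
      | cons d t2 => simp [ih]

theorem pv_zip_drop : ∀ (n : Nat) (l1 l2 : List Char), (l1.drop n).zip (l2.drop n) = (l1.zip l2).drop n := by
  intro n
  induction n with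
  | zero => intro l1 l2; simp
  | succ k ih =>
    intro l1 l2
    cases l1 with
    | nil => simp
    | cons c t1 =>
      cases l2 with
      | nil => simp
      | cons d t2 => simp [ih]

-- B's divide-and-conquer recursion computes the same pair-score sum
theorem pvGo_eq_sum (good wrong : Int) :
    ∀ n (a b : List Char), a.length = n → a.length = b.length →
      pvGo good wrong a b = ((a.zip b).map (pvW good wrong)).sum := by
  intro n
  induction n using Nat.strong_induction_on with
  | _ n ih =>
    intro a b hn hlen
    rw [pvGo]
    by_cases h0 : a = []
    · subst h0
      simp
    · simp only [h0, if_false]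
      by_cases h1 : a.length = 1
      · obtain ⟨c, hc⟩ := List.length_eq_one_iff.mp h1
        obtain ⟨d, hd⟩ := List.length_eq_one_iff.mp (by rw [← hlen]; exact h1)
        subst hc; subst hd
        simp only [List.length_cons, List.length_nil,  List.zip_cons_cons,
          List.zip_nil_right, List.map_cons, List.map_nil, List.sum_cons, List.sum_nil,
          add_zero, pvW]
        by_cases hcd : (c == d) = true
        · simp [hcd]
        · simp [hcd]
      · simp only [h1, if_false]
        set m := a.length / 2 with hm
        have hlen2 : 2 ≤ a.length := by
          have : a.length ≠ 0 := by simpa using h0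
          omega
        have hm1 : 1 ≤ m := by omega
        have hmlt : m < a.length := by omega
        have h1t : (a.take m).length = m := by simp; omega
        have h2t : (b.take m).length = m := by simp; omega
        have h1d : (a.drop m).length = a.length - m := by simp
        have h2d : (b.drop m).length = a.length - m := by simp; omega
        rw [ih m (by omega) _ _ h1t (by rw [h1t, h2t]),
            ih (a.length - m) (by omega) _ _ h1d (by rw [h1d, h2d])]
        rw [pv_zip_take, pv_zip_drop]
        rw [← List.sum_append, ← List.map_append, List.take_append_drop]

-- ===== VERDICT (by name: the statement is the Claim_ definition above) =====
theorem score_seqs_spec : Claim_equal_score_seqs := by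
  intro seq_1 seq_2 good wrong _
  unfold Spec_score_seqs score_seqs score_seqs_alt
  set l1 := seq_1.toList
  set l2 := seq_2.toList
  by_cases h : l1.length = l2.length
  · rw [if_neg (not_not_intro h), if_neg (not_not_intro h)]
    have hzl : (l1.zip l2).length = l1.length := by simp [List.length_zip, h]
    have hstep : (PySem.List.pyRange 0 (l1.length : Int) 1).foldl
        (fun score i =>
          if PySem.List.pyGetD l1 i ' ' == PySem.List.pyGetD l2 i ' ' then score + good
          else score + wrong) 0
        = (PySem.List.pyRange 0 ((l1.zip l2).length : Int) 1).foldl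
        (fun score i =>
          if (PySem.List.pyGetD (l1.zip l2) i (' ', ' ')).1 ==
             (PySem.List.pyGetD (l1.zip l2) i (' ', ' ')).2 then score + good
          else score + wrong) 0 := by
      rw [hzl]
      apply PySem.List.foldl_congr_mem
      intro acc i hi
      have hb := (PySem.List.mem_pyRange_one).1 hi
      rw [PySem.List.pyGetD_eq_getElem (xs := l1) (d := ' ') (by omega) (by exact_mod_cast hb.2),
          PySem.List.pyGetD_eq_getElem (xs := l2) (d := ' ') (by omega) (by omega),
          PySem.List.pyGetD_eq_getElem (xs := l1.zip l2) (d := (' ', ' ')) (by omega) (by omega)]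
      simp [List.getElem_zip]
    rw [hstep,
      PySem.List.foldl_pyRange_zero_pyGetD' (l1.zip l2) (' ', ' ')
        (fun score p => if p.1 == p.2 then score + good else score + wrong) 0,
      pv_fold_eq_sum, pvGo_eq_sum good wrong l1.length l1 l2 rfl h]
    ring
  · simp [h]
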